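-- pv_equiv track=rewrite | github.com/besser82/libxcrypt | test/ka-table-gen.py | strneq_7bit
-- ===== SOURCE A (Python) =====
-- def strneq_7bit (p1, p2, limit):
--     n1 = len(p1)
--     n2 = len(p2)
--     for i in range(limit):
--         if i == n1 and i == n2:
--             # strings are the same length, within the limit, and no
--             # mismatched characters were found
--             return True
--         if i == n1 or i == n2:
--             # one string is longer than the other, within the limit
--             return False
--         if (p1[i] & 0x7F) != (p2[i] & 0x7F):
--             # characters not equal, after masking the 8th bit
--             return False
--     # reached the limit, no mismatches found
--     return True
-- ===== SOURCE B (Python) =====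
-- def strneq_7bit(p1, p2, limit):
--     k = max(limit, 0)
--     return [c & 0x7F for c in p1[:k]] == [c & 0x7F for c in p2[:k]]
-- ===== Notes on version B (the rewrite author's own statement) =====
-- stated objective: simpler
-- what changed: Replaces A's indexed loop with early returns by a whole-value computation: truncate both inputs to max(limit,0), mask every byte with a comprehension, and return structural list equality (which subsumes A's per-step length checks, since list equality compares lengths).
import Mathlib
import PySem

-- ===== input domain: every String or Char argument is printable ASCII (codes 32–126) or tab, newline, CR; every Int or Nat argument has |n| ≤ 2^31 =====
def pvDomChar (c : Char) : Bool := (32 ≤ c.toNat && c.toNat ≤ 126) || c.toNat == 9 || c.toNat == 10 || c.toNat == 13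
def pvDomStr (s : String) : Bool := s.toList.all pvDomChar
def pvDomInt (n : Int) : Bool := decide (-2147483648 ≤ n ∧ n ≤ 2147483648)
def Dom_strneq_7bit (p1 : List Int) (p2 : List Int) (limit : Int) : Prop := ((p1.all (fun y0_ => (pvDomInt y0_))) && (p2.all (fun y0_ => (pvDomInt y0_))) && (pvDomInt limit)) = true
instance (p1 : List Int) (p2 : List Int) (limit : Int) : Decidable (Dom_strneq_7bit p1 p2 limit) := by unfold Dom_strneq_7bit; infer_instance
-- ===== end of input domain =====

-- B replaces A's indexed loop with early returns by a whole-value computation: truncate both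
-- inputs to max(limit,0), mask every byte, and compare the two masked lists structurally.


-- ===== PORT A =====
-- A's for-loop over range(limit): a counter i advancing while i < limit, with the loop's early
-- returns; pyGetD is exact here since indexing is reached only when the earlier branches
-- guarantee 0 ≤ i < len p1 and i < len p2.
def strneq7_loopA (p1 p2 : List Int) (n1 n2 : Int) (i limit : Int) : Bool :=
  if i < limit then
    if i = n1 ∧ i = n2 then true
    else if i = n1 ∨ i = n2 then false
    else if PySem.Int.band (PySem.List.pyGetD p1 i 0) 127 ≠ PySem.Int.band (PySem.List.pyGetD p2 i 0) 127 then false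
    else strneq7_loopA p1 p2 n1 n2 (i + 1) limit
  else true
termination_by (limit - i).toNat
decreasing_by omega

def strneq_7bit (p1 : List Int) (p2 : List Int) (limit : Int) : Bool :=
  let n1 : Int := p1.length
  let n2 : Int := p2.length
  strneq7_loopA p1 p2 n1 n2 0 limit

-- ===== PORT B =====
-- B: k = max(limit, 0); masked comprehension over each slice p[:k]; list equality.
def strneq_7bit_alt (p1 : List Int) (p2 : List Int) (limit : Int) : Bool :=
  let k : Int := max limit 0
  decide ((PySem.List.slice p1 none (some k)).map (fun c => PySem.Int.band c 127)
        = (PySem.List.slice p2 none (some k)).map (fun c => PySem.Int.band c 127))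

-- ===== PRECONDITION & SPEC =====
def Spec_strneq_7bit (p1 : List Int) (p2 : List Int) (limit : Int) (out : Bool) : Prop := out = strneq_7bit_alt p1 p2 limit
instance (p1 : List Int) (p2 : List Int) (limit : Int) (out : Bool) : Decidable (Spec_strneq_7bit p1 p2 limit out) := by unfold Spec_strneq_7bit; infer_instance

-- ===== CLAIM =====
def Claim_equal_strneq_7bit : Prop := ∀ (p1 : List Int) (p2 : List Int) (limit : Int), Dom_strneq_7bit p1 p2 limit → Spec_strneq_7bit p1 p2 limit (strneq_7bit p1 p2 limit)

-- ===== LEMMAS AND PROOFS =====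
-- Loop invariant: A's loop from index i decides equality of the masked K-truncations with the
-- first i elements dropped, where K = (max limit 0).toNat.
lemma strneq7_main (p1 p2 : List Int) (fuel : Nat) :
    ∀ (i limit : Int), 0 ≤ i → i ≤ (p1.length : Int) → i ≤ (p2.length : Int) →
    (limit - i).toNat ≤ fuel →
    strneq7_loopA p1 p2 p1.length p2.length i limit =
      decide (((p1.take (max limit 0).toNat).drop i.toNat).map (fun c => PySem.Int.band c 127)
            = ((p2.take (max limit 0).toNat).drop i.toNat).map (fun c => PySem.Int.band c 127)) := by
  induction fuel with
  | zero =>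
    intro i limit hi h1 h2 hk
    have hle : limit ≤ i := by omega
    have hK : (max limit 0).toNat ≤ i.toNat := by omega
    rw [strneq7_loopA, if_neg (by omega : ¬ i < limit),
        List.drop_eq_nil_of_le (le_trans (List.length_take_le _ _) hK),
        List.drop_eq_nil_of_le (le_trans (List.length_take_le _ _) hK)]
    simp
  | succ fuel ih =>
    intro i limit hi h1 h2 hk
    rw [strneq7_loopA]
    by_cases hlt : i < limit
    · rw [if_pos hlt]
      have hiK : i.toNat < (max limit 0).toNat := by omega
      by_cases hb : i = (p1.length : Int) ∧ i = (p2.length : Int)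
      · rw [if_pos hb]
        rw [List.drop_eq_nil_of_le (by simp; omega),
            List.drop_eq_nil_of_le (by simp; omega)]
        simp
      · rw [if_neg hb]
        by_cases hc : i = (p1.length : Int) ∨ i = (p2.length : Int)
        · rw [if_pos hc]
          have hlen : ((p1.take (max limit 0).toNat).drop i.toNat).length ≠
                      ((p2.take (max limit 0).toNat).drop i.toNat).length := by
            simp; omega
          rw [eq_comm, decide_eq_false_iff_not]
          intro hEq
          exact hlen (by simpa using congrArg List.length hEq)
        · rw [if_neg hc]
          have hi1 : i.toNat < p1.length := by omega
          have hi2 : i.toNat < p2.length := by omega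
          have ht1 : i.toNat < (p1.take (max limit 0).toNat).length := by simp; omega
          have ht2 : i.toNat < (p2.take (max limit 0).toNat).length := by simp; omega
          rw [List.drop_eq_getElem_cons ht1, List.drop_eq_getElem_cons ht2]
          have hg1 : (p1.take (max limit 0).toNat)[i.toNat] = p1[i.toNat] :=
            List.getElem_take
          have hg2 : (p2.take (max limit 0).toNat)[i.toNat] = p2[i.toNat] :=
            List.getElem_take
          have hp1 : PySem.List.pyGetD p1 i 0 = p1[i.toNat] :=
            PySem.List.pyGetD_eq_getElem _ _ hi (by omega)
          have hp2 : PySem.List.pyGetD p2 i 0 = p2[i.toNat] :=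
            PySem.List.pyGetD_eq_getElem _ _ hi (by omega)
          by_cases hd : PySem.Int.band (PySem.List.pyGetD p1 i 0) 127 ≠ PySem.Int.band (PySem.List.pyGetD p2 i 0) 127
          · rw [if_pos hd]
            rw [hp1, hp2] at hd
            rw [eq_comm, decide_eq_false_iff_not]
            simp only [List.map_cons, hg1, hg2]
            intro hEq
            exact hd (List.cons_eq_cons.mp hEq).1
          · rw [if_neg hd]
            rw [not_ne_iff] at hd
            rw [hp1, hp2] at hd
            have hrec := ih (i + 1) limit (by omega) (by omega) (by omega) (by omega)
            have hsucc : (i + 1).toNat = i.toNat + 1 := by omega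
            rw [hsucc] at hrec
            rw [hrec]
            simp only [List.map_cons, hg1, hg2, List.cons_eq_cons, hd, true_and]
    · rw [if_neg hlt]
      have hK : (max limit 0).toNat ≤ i.toNat := by omega
      rw [List.drop_eq_nil_of_le (le_trans (List.length_take_le _ _) hK),
          List.drop_eq_nil_of_le (le_trans (List.length_take_le _ _) hK)]
      simp

-- ===== VERDICT =====
theorem strneq_7bit_spec : Claim_equal_strneq_7bit := by
  intro p1 p2 limit _
  unfold Spec_strneq_7bit strneq_7bit strneq_7bit_alt
  have hs1 : PySem.List.slice p1 none (some (max limit 0)) = p1.take (max limit 0).toNat :=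
    PySem.List.slice_to p1 (le_max_right _ _)
  have hs2 : PySem.List.slice p2 none (some (max limit 0)) = p2.take (max limit 0).toNat :=
    PySem.List.slice_to p2 (le_max_right _ _)
  simp only [hs1, hs2]
  have := strneq7_main p1 p2 (limit - 0).toNat 0 limit (le_refl 0)
    (by positivity) (by positivity) (le_refl _)
  simpa using this
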